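-- pv_equiv track=rewrite | github.com/CS598JBR-Team-8-Private/CS598JBR-Team-8 | MP2/task_2.py | remove_pass_only_tests
-- ===== SOURCE A (Python) =====
-- def remove_pass_only_tests(code):
--     lines = code.split('\n')
--     new_lines = []
--     in_test = False
--     test_lines = []
--
--     for line in lines:
--         if line.strip().startswith('def test_') and line.strip().endswith(':'):
--             if in_test and not any('pass' in tl.strip() and len(tl.strip()) == 4 for tl in test_lines if tl.strip()):
--                 new_lines.extend(test_lines)
--             in_test = True
--             test_lines = [line]
--         elif in_test and (line.strip() == '' or line.startswith(' ')):
--             test_lines.append(line)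
--         elif in_test:
--             if not any('pass' in tl.strip() and len(tl.strip()) == 4 for tl in test_lines if tl.strip()):
--                 new_lines.extend(test_lines)
--             in_test = False
--             new_lines.append(line)
--         else:
--             new_lines.append(line)
--
--     if in_test and not any('pass' in tl.strip() and len(tl.strip()) == 4 for tl in test_lines if tl.strip()):
--         new_lines.extend(test_lines)
--
--     return '\n'.join(new_lines)
-- ===== SOURCE B (Python) =====
-- def _is_test_header(line):
--     s = line.strip()
--     return s.startswith('def test_') and s.endswith(':')
--
--
-- def _is_continuation(line):
--     return line.strip() == '' or line.startswith(' ')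
--
--
-- def _take_block(rest):
--     """Split off the continuation lines of a test block: (body, remainder)."""
--     body = []
--     while rest and not _is_test_header(rest[0]) and _is_continuation(rest[0]):
--         body.append(rest[0])
--         rest = rest[1:]
--     return body, rest
--
--
-- def _segments(lines):
--     """Group lines into segments: (True, test block) or (False, [plain line])."""
--     segs = []
--     while lines:
--         first, rest = lines[0], lines[1:]
--         if _is_test_header(first):
--             body, rest = _take_block(rest)
--             segs.append((True, [first] + body))
--         else:
--             segs.append((False, [first]))
--         lines = rest
--     return segs
--
--
-- def remove_pass_only_tests(code):
--     out = []
--     for is_test, seg in _segments(code.split('\n')):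
--         if not (is_test and any(l.strip() == 'pass' for l in seg)):
--             out.extend(seg)
--     return '\n'.join(out)
-- ===== Notes on version B (the rewrite author's own statement) =====
-- stated objective: alternative
-- what changed: Replaces A's stateful single pass (in_test flag, pending test_lines buffer, three flush sites) by a two-phase decomposition: first group the lines into segments (plain line or complete test block), then filter out pass-only test blocks and join.
import Mathlib
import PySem

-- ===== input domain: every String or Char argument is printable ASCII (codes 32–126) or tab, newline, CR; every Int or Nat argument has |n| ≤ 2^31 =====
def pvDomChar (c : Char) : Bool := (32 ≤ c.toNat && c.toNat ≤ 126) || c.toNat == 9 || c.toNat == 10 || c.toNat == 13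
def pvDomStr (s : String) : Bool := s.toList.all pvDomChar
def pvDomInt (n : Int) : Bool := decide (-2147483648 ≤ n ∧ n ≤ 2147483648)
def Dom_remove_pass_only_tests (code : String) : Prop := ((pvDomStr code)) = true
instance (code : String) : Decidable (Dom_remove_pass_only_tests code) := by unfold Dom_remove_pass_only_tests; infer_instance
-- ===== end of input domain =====

-- B replaces A's stateful flag/buffer single pass by a two-phase grouping (segments) then filtering decomposition; same cost, different structure.

-- ===== PORT A =====
def pvHeaderA (line : String) : Bool :=
  PySem.Str.startswith (PySem.Str.strip line) "def test_" &&
    PySem.Str.endswith (PySem.Str.strip line) ":"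

-- A's pass-only check: any('pass' in tl.strip() and len(tl.strip()) == 4 for tl in test_lines if tl.strip())
def pvHasPassA (test_lines : List String) : Bool :=
  (test_lines.filter (fun tl => !(PySem.Str.strip tl == ""))).any
    (fun tl => PySem.Str.isIn "pass" (PySem.Str.strip tl) &&
      (PySem.Str.len (PySem.Str.strip tl) == (4 : Int)))

def pvLoopA : List String → List String → Bool → List String → List String
  | [], new_lines, in_test, test_lines =>
      if in_test && !pvHasPassA test_lines then new_lines ++ test_lines else new_lines
  | line :: rest, new_lines, in_test, test_lines =>
      if pvHeaderA line then
        pvLoopA rest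
          (if in_test && !pvHasPassA test_lines then new_lines ++ test_lines else new_lines)
          true [line]
      else if in_test && (PySem.Str.strip line == "" || PySem.Str.startswith line " ") then
        pvLoopA rest new_lines in_test (test_lines ++ [line])
      else if in_test then
        pvLoopA rest
          ((if !pvHasPassA test_lines then new_lines ++ test_lines else new_lines) ++ [line])
          false test_lines
      else
        pvLoopA rest (new_lines ++ [line]) false test_lines

def remove_pass_only_tests (code : String) : String :=
  PySem.Str.join "\n" (pvLoopA ((PySem.Str.split? code "\n").getD []) [] false [])

-- ===== PORT B =====
def pvIsTestHeader (line : String) : Bool :=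
  let s := PySem.Str.strip line
  PySem.Str.startswith s "def test_" && PySem.Str.endswith s ":"

def pvIsContinuation (line : String) : Bool :=
  PySem.Str.strip line == "" || PySem.Str.startswith line " "

-- _take_block: split off the continuation lines of a test block
def pvTakeBlock : List String → List String × List String
  | [] => ([], [])
  | l :: rest =>
      if !pvIsTestHeader l && pvIsContinuation l then
        let p := pvTakeBlock rest
        (l :: p.1, p.2)
      else ([], l :: rest)

lemma pvTakeBlock_rest_le : ∀ ls : List String, (pvTakeBlock ls).2.length ≤ ls.length := by
  intro ls
  induction ls with
  | nil => simp [pvTakeBlock]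
  | cons l rest ih =>
      simp only [pvTakeBlock]
      split
      · exact Nat.le_succ_of_le ih
      · simp

-- _segments: group lines into plain-line and test-block segments
def pvSegments : List String → List (Bool × List String)
  | [] => []
  | first :: rest =>
      if pvIsTestHeader first then
        let p := pvTakeBlock rest
        (true, first :: p.1) :: pvSegments p.2
      else
        (false, [first]) :: pvSegments rest
  termination_by ls => ls.length
  decreasing_by
  · exact Nat.lt_succ_of_le (pvTakeBlock_rest_le rest)
  · simp

def pvDropSeg (s : Bool × List String) : Bool :=
  s.1 && s.2.any (fun l => PySem.Str.strip l == "pass")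

def remove_pass_only_tests_alt (code : String) : String :=
  PySem.Str.join "\n"
    (((pvSegments ((PySem.Str.split? code "\n").getD [])).filter
        (fun s => !pvDropSeg s)).flatMap (fun s => s.2))

-- ===== PRECONDITION & SPEC =====
def Spec_remove_pass_only_tests (code : String) (out : String) : Prop := out = remove_pass_only_tests_alt code
instance (code : String) (out : String) : Decidable (Spec_remove_pass_only_tests code out) := by unfold Spec_remove_pass_only_tests; infer_instance

-- ===== CLAIM (what is proved, stated in full; the proofs are below) =====
def Claim_equal_remove_pass_only_tests : Prop := ∀ (code : String), Dom_remove_pass_only_tests code → Spec_remove_pass_only_tests code (remove_pass_only_tests code)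

-- ===== LEMMAS AND PROOFS =====

-- the flattened kept output of B on a line list
def pvFlat (ls : List String) : List String :=
  ((pvSegments ls).filter (fun s => !pvDropSeg s)).flatMap (fun s => s.2)

-- a kept/dropped test block
def pvKeepT (t : List String) : List String :=
  if t.any (fun l => PySem.Str.strip l == "pass") then [] else t

-- ('pass' in s and len(s) == 4), restricted to non-empty s, is exactly s == 'pass'
lemma pv_pass_cond (s : String) :
    (!(s == "") && (PySem.Str.isIn "pass" s && (PySem.Str.len s == (4 : Int)))) = (s == "pass") := by
  by_cases h : s = "pass"
  · subst h; decide
  · have h2 : (s == "pass") = false := by simp [h]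
    rw [h2]
    by_cases hin : PySem.Str.isIn "pass" s = true
    · by_cases hlen : PySem.Str.len s = (4 : Int)
      · exfalso
        apply h
        have hinf := (PySem.Str.isIn_iff_infix _ _).mp hin
        have hl : s.toList.length = 4 := by
          have := PySem.Str.len_eq s
          omega
        exact (String.toList_inj.mp (hinf.sublist.eq_of_length (by simp [hl]))).symm
      · have h4 : (PySem.Str.len s == (4 : Int)) = false := by
          simp only [beq_eq_false_iff_ne, ne_eq]
          exact hlen
        rw [h4]
        simp
    · simp [Bool.not_eq_true] at hin
      simp [hin]

lemma pv_hasPass_eq (t : List String) :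
    pvHasPassA t = t.any (fun l => PySem.Str.strip l == "pass") := by
  unfold pvHasPassA
  rw [List.any_filter]
  congr 1
  funext l
  exact pv_pass_cond (PySem.Str.strip l)

lemma pv_headerA_eq (l : String) : pvHeaderA l = pvIsTestHeader l := rfl

lemma pv_flat_nil : pvFlat [] = [] := by simp [pvFlat, pvSegments]

lemma pv_flat_cons_header (l : String) (ls : List String) (h : pvIsTestHeader l = true) :
    pvFlat (l :: ls) = pvKeepT (l :: (pvTakeBlock ls).1) ++ pvFlat (pvTakeBlock ls).2 := by
  simp only [pvFlat, pvSegments, h, if_pos, pvKeepT]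
  by_cases hd : (l :: (pvTakeBlock ls).1).any (fun x => PySem.Str.strip x == "pass")
  · simp [List.filter, pvDropSeg, hd]
  · simp [List.filter, pvDropSeg, hd]

lemma pv_flat_cons_plain (l : String) (ls : List String) (h : pvIsTestHeader l = false) :
    pvFlat (l :: ls) = l :: pvFlat ls := by
  simp [pvFlat, pvSegments, h, pvDropSeg]

lemma pv_flush (acc test : List String) :
    (if !pvHasPassA test then acc ++ test else acc) = acc ++ pvKeepT test := by
  rw [pv_hasPass_eq]
  unfold pvKeepT
  by_cases hp : test.any (fun l => PySem.Str.strip l == "pass") = true <;> simp [hp]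

lemma pv_loop_eq (ls : List String) :
    (∀ acc test, pvLoopA ls acc false test = acc ++ pvFlat ls) ∧
    (∀ acc test, pvLoopA ls acc true test =
      acc ++ pvKeepT (test ++ (pvTakeBlock ls).1) ++ pvFlat (pvTakeBlock ls).2) := by
  induction ls with
  | nil =>
      constructor <;> intro acc test
      · simp [pvLoopA, pv_flat_nil]
      · simp only [pvLoopA, Bool.true_and, pv_flush, pvTakeBlock, pv_flat_nil,
          List.append_nil]
  | cons l ls ih =>
      by_cases hh : pvIsTestHeader l = true
      · have htb : pvTakeBlock (l :: ls) = ([], l :: ls) := by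
          simp [pvTakeBlock, hh]
        constructor <;> intro acc test
        · have e1 : pvLoopA (l :: ls) acc false test = pvLoopA ls acc true [l] := by
            simp [pvLoopA, pv_headerA_eq, hh]
          rw [e1, ih.2, pv_flat_cons_header l ls hh]
          simp
        · have e1 : pvLoopA (l :: ls) acc true test =
              pvLoopA ls (acc ++ pvKeepT test) true [l] := by
            simp only [pvLoopA, pv_headerA_eq, hh, if_true, Bool.true_and, pv_flush]
          rw [e1, ih.2, htb, pv_flat_cons_header l ls hh]
          simp
      · have hh' : pvIsTestHeader l = false := by simpa using hh
        by_cases hc : pvIsContinuation l = true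
        · constructor <;> intro acc test
          · have e1 : pvLoopA (l :: ls) acc false test =
                pvLoopA ls (acc ++ [l]) false test := by
              simp [pvLoopA, pv_headerA_eq, hh']
            rw [e1, ih.1, pv_flat_cons_plain l ls hh']
            simp
          · have htb : pvTakeBlock (l :: ls) = (l :: (pvTakeBlock ls).1, (pvTakeBlock ls).2) := by
              simp [pvTakeBlock, hh', hc]
            have hc2 : (PySem.Str.strip l == "" || PySem.Str.startswith l " ") = true := hc
            have e1 : pvLoopA (l :: ls) acc true test =
                pvLoopA ls acc true (test ++ [l]) := by
              simp only [pvLoopA, pv_headerA_eq, hh', Bool.false_eq_true, if_false,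
                Bool.true_and, hc2, if_true]
            rw [e1, ih.2, htb]
            simp
        · have hc' : pvIsContinuation l = false := by simpa using hc
          have hcond : (PySem.Str.strip l == "" || PySem.Str.startswith l " ") = false := hc'
          have htb : pvTakeBlock (l :: ls) = ([], l :: ls) := by
            simp [pvTakeBlock, hc']
          constructor <;> intro acc test
          · have e1 : pvLoopA (l :: ls) acc false test =
                pvLoopA ls (acc ++ [l]) false test := by
              simp only [pvLoopA, pv_headerA_eq, hh', Bool.false_eq_true, if_false,
                Bool.false_and]
            rw [e1, ih.1, pv_flat_cons_plain l ls hh']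
            simp
          · have e1 : pvLoopA (l :: ls) acc true test =
                pvLoopA ls ((acc ++ pvKeepT test) ++ [l]) false test := by
              simp only [pvLoopA, pv_headerA_eq, hh', Bool.false_eq_true, if_false,
                Bool.true_and, hcond, pv_flush, if_true]
            rw [e1, ih.1, htb, pv_flat_cons_plain l ls hh']
            simp

-- ===== VERDICT (by name: the statement is the Claim_ definition above) =====
theorem remove_pass_only_tests_spec : Claim_equal_remove_pass_only_tests := by
  intro code _
  unfold Spec_remove_pass_only_tests remove_pass_only_tests remove_pass_only_tests_alt
  rw [(pv_loop_eq ((PySem.Str.split? code "\n").getD [])).1 [] []]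
  rfl
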